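-- pv_equiv track=rewrite | github.com/shi-mo/atcoder | abc252/D/main.py | solve
-- ===== SOURCE A (Python) =====
-- from collections import defaultdict
--
-- def solve(N: int, A: "List[int]"):
--     count_of = defaultdict(lambda: 0)
--     for ai in A:
--         count_of[ai] += 1
--
--     ans = N*(N-1)*(N-2)//6
--     for c in count_of.values():
--         if c < 2: continue
--         ans -= (N-c)*c*(c-1)//2
--         if 3 <= c: ans -= c*(c-1)*(c-2)//6
--     return ans
-- ===== SOURCE B (Python) =====
-- def solve(N: int, A: "List[int]"):
--     ans = N * (N - 1) * (N - 2) // 6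
--     cnt = {}
--     for ai in A:
--         c = cnt.get(ai, 0)
--         ans -= c * (N - 1 - c)
--         cnt[ai] = c + 1
--     return ans
-- ===== Notes on version B (the rewrite author's own statement) =====
-- stated objective: simpler
-- what changed: Replaces A's two-phase scheme (build a frequency dict, then a second branching loop over counts subtracting (N-c)*C(c,2) and C(c,3) with floor divisions) by a single streaming pass: for an element whose value was already seen c times, subtract c*(N-1-c) on the spot; only the initial C(N,3) uses division and the values() loop disappears.
import Mathlib
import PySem

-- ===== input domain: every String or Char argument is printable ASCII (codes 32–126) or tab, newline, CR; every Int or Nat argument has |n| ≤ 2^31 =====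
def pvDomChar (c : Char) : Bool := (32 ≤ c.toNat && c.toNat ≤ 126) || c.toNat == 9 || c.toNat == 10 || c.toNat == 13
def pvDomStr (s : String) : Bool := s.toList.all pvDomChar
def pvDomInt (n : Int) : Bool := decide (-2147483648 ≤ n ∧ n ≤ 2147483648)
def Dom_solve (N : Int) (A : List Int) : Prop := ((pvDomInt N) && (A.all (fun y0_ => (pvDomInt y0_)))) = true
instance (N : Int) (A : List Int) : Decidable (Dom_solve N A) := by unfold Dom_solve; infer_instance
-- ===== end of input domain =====

-- B replaces A's count-then-branching-correct two-phase scheme by one streaming pass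
-- (each element seen c times before subtracts c*(N-1-c)); same O(n) cost, simpler code.

-- ===== PORT A =====
def solve (N : Int) (A : List Int) : Int :=
  let countOf := A.foldl (fun d ai => d.modify ai 0 (· + 1)) (PySem.Dict.empty : PySem.Dict Int Int)
  let ans := PySem.Int.floordiv (N * (N - 1) * (N - 2)) 6
  countOf.values.foldl (fun ans c =>
    if c < 2 then ans
    else
      let ans := ans - PySem.Int.floordiv ((N - c) * c * (c - 1)) 2
      if 3 ≤ c then ans - PySem.Int.floordiv (c * (c - 1) * (c - 2)) 6 else ans) ans

-- ===== PORT B =====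
def solve_alt (N : Int) (A : List Int) : Int :=
  let ans := PySem.Int.floordiv (N * (N - 1) * (N - 2)) 6
  (A.foldl (fun (s : Int × PySem.Dict Int Int) ai =>
      let c := s.2.getD ai 0
      (s.1 - c * (N - 1 - c), s.2.insert ai (c + 1))) (ans, PySem.Dict.empty)).1

-- ===== PRECONDITION & SPEC =====
def Spec_solve (N : Int) (A : List Int) (out : Int) : Prop := out = solve_alt N A
instance (N : Int) (A : List Int) (out : Int) : Decidable (Spec_solve N A out) := by unfold Spec_solve; infer_instance

-- ===== CLAIM (what is proved, stated in full; the proofs are below) =====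
def Claim_equal_solve : Prop := ∀ (N : Int) (A : List Int), Dom_solve N A → Spec_solve N A (solve N A)

-- ===== LEMMAS AND PROOFS =====

-- the per-count correction A subtracts for one value-count c
def corr (N c : Int) : Int :=
  if c < 2 then 0
  else PySem.Int.floordiv ((N - c) * c * (c - 1)) 2
    + (if 3 ≤ c then PySem.Int.floordiv (c * (c - 1) * (c - 2)) 6 else 0)

-- the total B subtracts while one value's count climbs from 0 to c
def hsum (N c : Int) : Int := ((List.range c.toNat).map (fun j : Nat => (j : Int) * (N - 1 - (j : Int)))).sum

-- Φ d: the total B has subtracted after building dict d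
def phi (N : Int) (d : PySem.Dict Int Int) : Int := (d.values.map (hsum N)).sum

lemma loop_eq (N : Int) (vs : List Int) (init : Int) :
    vs.foldl (fun ans c =>
      if c < 2 then ans
      else
        let ans := ans - PySem.Int.floordiv ((N - c) * c * (c - 1)) 2
        if 3 ≤ c then ans - PySem.Int.floordiv (c * (c - 1) * (c - 2)) 6 else ans) init
    = init - (vs.map (corr N)).sum := by
  induction vs generalizing init with
  | nil => simp
  | cons c t ih =>
    simp only [List.foldl_cons, List.map_cons, List.sum_cons, ih, corr]
    split_ifs <;> ring

lemma two_dvd_mul_pred (c : Int) : 2 ∣ c * (c - 1) := by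
  rcases Int.even_or_odd c with ⟨k, hk⟩ | ⟨k, hk⟩
  · exact ⟨k * (c - 1), by rw [hk]; ring⟩
  · exact ⟨c * k, by rw [hk]; ring⟩

lemma six_dvd_three_consec (c : Int) : 6 ∣ c * (c - 1) * (c - 2) := by
  have h : ∀ z : ZMod 6, z * (z - 1) * (z - 2) = 0 := by decide
  exact (ZMod.intCast_zmod_eq_zero_iff_dvd (c * (c - 1) * (c - 2)) 6).mp (by push_cast; exact h c)

lemma six_corr (N c : Int) (hc : 0 ≤ c) :
    6 * corr N c = c * (c - 1) * (3 * N - 2 * c - 2) := by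
  unfold corr
  by_cases h2 : c < 2
  · have : c = 0 ∨ c = 1 := by omega
    rcases this with h | h <;> simp [h]
  · push Not at h2
    have hd2 : 2 ∣ (N - c) * c * (c - 1) := by
      rcases two_dvd_mul_pred c with ⟨k, hk⟩
      exact ⟨(N - c) * k, by rw [mul_assoc, hk]; ring⟩
    rw [if_neg (by omega)]
    rw [PySem.Int.floordiv_eq_ediv_of_pos (by norm_num : (0:Int) < 2)]
    by_cases h3 : 3 ≤ c
    · rw [if_pos h3, PySem.Int.floordiv_eq_ediv_of_pos (by norm_num : (0:Int) < 6)]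
      obtain ⟨a, ha⟩ := hd2
      obtain ⟨b, hb⟩ := six_dvd_three_consec c
      rw [ha, hb, Int.mul_ediv_cancel_left a (by norm_num), Int.mul_ediv_cancel_left b (by norm_num)]
      nlinarith [ha, hb]
    · rw [if_neg h3]
      have hc2 : c = 2 := by omega
      subst hc2
      norm_num
      ring

lemma six_hsum (N c : Int) (hc : 0 ≤ c) :
    6 * hsum N c = c * (c - 1) * (3 * N - 2 * c - 2) := by
  obtain ⟨n, rfl⟩ := Int.eq_ofNat_of_zero_le hc
  induction n with
  | zero => simp [hsum]
  | succ m ih =>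
    have h1 : ((m + 1 : Nat) : Int).toNat = m + 1 := by omega
    have h2 : ((m : Nat) : Int).toNat = m := by omega
    unfold hsum at ih ⊢
    rw [h1, List.range_succ, List.map_append, List.sum_append]
    rw [h2] at ih
    have := ih (by positivity)
    simp only [List.map_cons, List.map_nil, List.sum_cons, List.sum_nil]
    push_cast
    push_cast at this
    nlinarith [this]

lemma hsum_eq_corr (N c : Int) (hc : 0 ≤ c) : hsum N c = corr N c := by
  apply mul_left_cancel₀ (by norm_num : (6:Int) ≠ 0)
  rw [six_hsum N c hc, six_corr N c hc]

-- sum over a nodup list with one value rewritten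
lemma sum_map_if_eq {ks : List Int} (hnd : ks.Nodup) {k : Int} (hk : k ∈ ks)
    (f : Int → Int) (b : Int) :
    (ks.map (fun j => if j = k then b else f j)).sum = (ks.map f).sum + b - f k := by
  induction ks with
  | nil => cases hk
  | cons x t ih =>
    rcases List.mem_cons.mp hk with h | hmem
    · subst h
      simp only [List.map_cons, List.sum_cons]
      have hnx : k ∉ t := (List.nodup_cons.mp hnd).1
      have : (t.map (fun j => if j = k then b else f j)) = t.map f := by
        apply List.map_congr_left
        intro j hj
        rw [if_neg (by rintro rfl; exact hnx hj)]
      rw [this]; simp [add_comm]; omega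
    · have hnx : x ∉ t := (List.nodup_cons.mp hnd).1
      have hxk : x ≠ k := by rintro rfl; exact hnx hmem
      simp only [List.map_cons, List.sum_cons, if_neg hxk]
      rw [ih (List.nodup_cons.mp hnd).2 hmem]; ring

lemma phi_insert (N : Int) (d : PySem.Dict Int Int) (hnd : d.keys.Nodup)
    (k v : Int) :
    phi N (d.insert k (v)) = phi N d + hsum N v - hsum N (d.getD k 0) := by
  by_cases hc : d.contains k
  · have hkeys : (d.insert k v).keys = d.keys := PySem.Dict.keys_insert_of_contains d v hc
    have hmem : k ∈ d.keys := (PySem.Dict.contains_iff_mem_keys d k).mp hc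
    unfold phi
    rw [PySem.Dict.values_eq_map_keys (d.insert k v) (by rw [hkeys]; exact hnd) 0,
        PySem.Dict.values_eq_map_keys d hnd 0, hkeys, List.map_map, List.map_map]
    have : (d.keys.map (hsum N ∘ fun j => (d.insert k v).getD j 0))
        = d.keys.map (fun j => if j = k then hsum N v else (hsum N ∘ fun j => d.getD j 0) j) := by
      apply List.map_congr_left
      intro j _
      simp only [Function.comp, PySem.Dict.getD_insert]
      split_ifs <;> rfl
    rw [this, sum_map_if_eq hnd hmem]
    simp only [Function.comp]
  · have h0 : d.getD k 0 = 0 := PySem.Dict.getD_of_not_contains d 0 (by simpa using hc)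
    have hitems := PySem.Dict.items_insert_of_not_contains d v (by simpa using hc)
    unfold phi
    have hvals : (d.insert k v).values = d.values ++ [v] := by
      show (d.insert k v).items.map (·.2) = d.items.map (·.2) ++ [v]
      rw [hitems, List.map_append]; rfl
    rw [hvals, List.map_append, List.sum_append, h0]
    simp [hsum]

-- dict component of B's fold, as the bare insert-counter fold
lemma loopB_eq (N : Int) (l : List Int) (a : Int) (d : PySem.Dict Int Int)
    (hnd : d.keys.Nodup) (hnn : ∀ v ∈ d.values, 0 ≤ v) :
    (l.foldl (fun (s : Int × PySem.Dict Int Int) ai =>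
        let c := s.2.getD ai 0
        (s.1 - c * (N - 1 - c), s.2.insert ai (c + 1))) (a, d)).1
      = a - (phi N (l.foldl (fun d x => d.insert x (d.getD x 0 + 1)) d) - phi N d) := by
  induction l generalizing a d with
  | nil => simp
  | cons x t ih =>
    simp only [List.foldl_cons]
    set c := d.getD x 0 with hc
    have hc0 : 0 ≤ c := by
      cases h : d.get? x with
      | none => rw [hc, PySem.Dict.getD_of_get?_eq_none d 0 h]
      | some v =>
        have hcv : c = v := by rw [hc, PySem.Dict.getD_of_get?_eq_some d 0 h]
        rw [hcv]
        exact hnn v (by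
          have := PySem.Dict.mem_items_of_get?_eq_some d h
          exact List.mem_map.mpr ⟨(x, v), this, rfl⟩)
    have hnd' : (d.insert x (c + 1)).keys.Nodup := PySem.Dict.nodup_keys_insert d x (c + 1) hnd
    have hnn' : ∀ v ∈ (d.insert x (c + 1)).values, 0 ≤ v := by
      intro v hv
      rcases PySem.Dict.mem_values_insert d x (c + 1) v hv with rfl | hv'
      · omega
      · exact hnn v hv'
    rw [ih _ _ hnd' hnn']
    rw [phi_insert N d hnd x (c + 1)]
    have hstep : hsum N (c + 1) = hsum N c + c * (N - 1 - c) := by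
      unfold hsum
      have h1 : (c + 1).toNat = c.toNat + 1 := by omega
      have h2 : (c.toNat : Int) = c := by omega
      rw [h1, List.range_succ, List.map_append, List.sum_append]
      simp [h2]
    rw [hstep, ← hc]
    ring

lemma counter_values_nonneg (A : List Int) : ∀ c ∈ (PySem.Dict.counter A).values, 0 ≤ c := by
  intro c hc
  have : (PySem.Dict.counter A).values
      = ((PySem.Dict.counter A).items).map (·.2) := rfl
  rw [this, PySem.Dict.items_counter] at hc
  simp only [List.map_map, List.mem_map] at hc
  obtain ⟨k, _, hk⟩ := hc
  simp only [Function.comp] at hk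
  rw [← hk]
  exact Int.natCast_nonneg _

theorem solve_eq_alt (N : Int) (A : List Int) : solve N A = solve_alt N A := by
  unfold solve solve_alt
  simp only []
  rw [show (A.foldl (fun d ai => d.modify ai 0 (· + 1)) (PySem.Dict.empty : PySem.Dict Int Int))
        = PySem.Dict.counter A from rfl]
  rw [loop_eq]
  rw [loopB_eq N A _ PySem.Dict.empty PySem.Dict.nodup_keys_empty (by intro v hv; simp [show (PySem.Dict.empty : PySem.Dict Int Int).values = [] from rfl] at hv)]
  rw [show (A.foldl (fun d x => d.insert x (d.getD x 0 + 1)) PySem.Dict.empty)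
        = PySem.Dict.counter A from PySem.Dict.foldl_insert_getD_add_one_eq_counter A]
  have hphi : phi N (PySem.Dict.counter A)
      = (((PySem.Dict.counter A).values).map (corr N)).sum := by
    unfold phi
    apply congrArg
    apply List.map_congr_left
    intro c hc
    exact hsum_eq_corr N c (counter_values_nonneg A c hc)
  rw [hphi]
  have hempty : phi N (PySem.Dict.empty : PySem.Dict Int Int) = 0 := rfl
  rw [hempty]
  ring

-- ===== VERDICT (by name: the statement is the Claim_ definition above) =====
theorem solve_spec : Claim_equal_solve := by
  intro N A _
  unfold Spec_solve
  exact solve_eq_alt N A
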